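-- pv_equiv track=rewrite | github.com/redx14/Visual_Calculator_and_number_alogrithms | my_functions.py | two_vertical_lines
-- ===== SOURCE A (Python) =====
-- def two_vertical_lines(width2, height2, char3):
--     pattern3 = ""
--     if width2 == 1:
--         for c in range(height2):
--             pattern3 = pattern3 + char3 + '\n'
--         return pattern3
--     else:
--         for c in range(height2):
--             pattern3 = pattern3 + char3
--             for d in range(width2):
--                 if d > 1:
--                     pattern3 = pattern3 + " "
--             pattern3 = pattern3 + char3 + '\n'
--         return pattern3
-- ===== SOURCE B (Python) =====
-- def two_vertical_lines(width2, height2, char3):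
--     if height2 <= 0:
--         return ''
--     if width2 == 1:
--         row = char3 + '\n'
--     else:
--         row = char3 + ' ' * (width2 - 2) + char3 + '\n'
--     return row * height2
-- ===== Notes on version B (the rewrite author's own statement) =====
-- stated objective: faster
-- what changed: Both loops are replaced by arithmetic: the row is built in closed form (char3 + ' '*(width2-2) + char3 + '\n') and the whole pattern is string repetition row * height2, instead of a per-cell inner loop and per-row concatenation.
import Mathlib
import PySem

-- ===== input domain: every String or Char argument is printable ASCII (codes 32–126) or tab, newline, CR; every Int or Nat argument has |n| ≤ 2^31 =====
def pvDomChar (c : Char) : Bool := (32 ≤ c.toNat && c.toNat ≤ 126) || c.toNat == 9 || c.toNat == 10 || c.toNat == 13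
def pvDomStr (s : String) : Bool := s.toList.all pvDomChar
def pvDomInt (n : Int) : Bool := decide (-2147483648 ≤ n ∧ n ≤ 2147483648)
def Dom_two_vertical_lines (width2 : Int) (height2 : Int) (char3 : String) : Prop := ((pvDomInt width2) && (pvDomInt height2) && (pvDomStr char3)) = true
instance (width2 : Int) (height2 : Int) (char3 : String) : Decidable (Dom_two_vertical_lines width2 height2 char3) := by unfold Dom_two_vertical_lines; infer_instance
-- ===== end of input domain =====

-- B replaces both accumulation loops by a closed-form row and string repetition (measured faster).
-- Strings are handled as List Char internally (Lean's String ++ is opaque to the kernel).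

-- ===== PORT A =====
-- literal transliteration of A: outer loop over range(height2), inner loop over range(width2)
def two_vertical_lines (width2 : Int) (height2 : Int) (char3 : String) : String :=
  if width2 == 1 then
    String.ofList ((PySem.List.pyRange 0 height2 1).foldl
      (fun pattern3 _ => pattern3 ++ char3.toList ++ ['\n']) [])
  else
    String.ofList ((PySem.List.pyRange 0 height2 1).foldl
      (fun pattern3 _ =>
        let p1 := pattern3 ++ char3.toList
        let p2 := (PySem.List.pyRange 0 width2 1).foldl
          (fun q d => if d > 1 then q ++ [' '] else q) p1
        p2 ++ char3.toList ++ ['\n']) [])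

-- ===== PORT B =====
-- closed-form row, repeated height2 times (row * height2)
def two_vertical_lines_alt (width2 : Int) (height2 : Int) (char3 : String) : String :=
  if height2 ≤ 0 then ""
  else
    let row : List Char :=
      if width2 == 1 then char3.toList ++ ['\n']
      else char3.toList ++ List.replicate (width2 - 2).toNat ' ' ++ char3.toList ++ ['\n']
    String.ofList (PySem.List.pyRepeat row height2)

-- ===== PRECONDITION & SPEC =====
def Spec_two_vertical_lines (width2 : Int) (height2 : Int) (char3 : String) (out : String) : Prop := out = two_vertical_lines_alt width2 height2 char3
instance (width2 : Int) (height2 : Int) (char3 : String) (out : String) : Decidable (Spec_two_vertical_lines width2 height2 char3 out) := by unfold Spec_two_vertical_lines; infer_instance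

-- ===== CLAIM (what is proved, stated in full; the proofs are below) =====
def Claim_equal_two_vertical_lines : Prop := ∀ (width2 : Int) (height2 : Int) (char3 : String), Dom_two_vertical_lines width2 height2 char3 → Spec_two_vertical_lines width2 height2 char3 (two_vertical_lines width2 height2 char3)

-- ===== LEMMAS AND PROOFS =====
theorem pv_inner_tail (n : Nat) : ∀ (a : Int), 2 ≤ a → ∀ (p : List Char),
    (PySem.List.pyRange a (a + n) 1).foldl (fun q d => if d > 1 then q ++ [' '] else q) p
      = p ++ List.replicate n ' ' := by
  induction n with
  | zero => intro a _ p; simp [PySem.List.pyRange_one_eq_nil]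
  | succ m ih =>
    intro a ha p
    have h1 : a ≤ a + (m : Int) := by omega
    have : PySem.List.pyRange a (a + (m + 1 : Nat)) 1
        = PySem.List.pyRange a (a + m) 1 ++ [a + m] := by
      have := PySem.List.pyRange_one_succ_right h1
      simpa [add_assoc] using this -- rewrite range bound
    rw [this, List.foldl_append, ih a ha p]
    have hgt : (a + (m : Int)) > 1 := by omega
    simp [hgt, List.replicate_succ' ]

theorem pv_inner (w : Int) (p : List Char) :
    (PySem.List.pyRange 0 w 1).foldl (fun q d => if d > 1 then q ++ [' '] else q) p
      = p ++ List.replicate (w - 2).toNat ' ' := by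
  by_cases hw : w ≤ 2
  · have hrep : (w - 2).toNat = 0 := by omega
    rw [hrep]
    by_cases h0 : w ≤ 0
    · simp [PySem.List.pyRange_one_eq_nil h0]
    · have h12 : w = 1 ∨ w = 2 := by omega
      rcases h12 with h | h <;> subst h
      · rw [show PySem.List.pyRange 0 1 1 = [0] from by decide]; simp
      · rw [show PySem.List.pyRange 0 2 1 = [0, 1] from by decide]; simp
  · have hsplit : PySem.List.pyRange 0 w 1
        = PySem.List.pyRange 0 2 1 ++ PySem.List.pyRange 2 w 1 :=
      PySem.List.pyRange_one_append 0 2 w (by omega) (by omega)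
    rw [hsplit, List.foldl_append, show PySem.List.pyRange 0 2 1 = [0, 1] from by decide]
    have hrange : PySem.List.pyRange 2 w 1
        = PySem.List.pyRange 2 (2 + ((w - 2).toNat : Int)) 1 := by congr 1; omega
    simp only [List.foldl_cons, List.foldl_nil]
    norm_num
    rw [hrange]
    exact pv_inner_tail (w - 2).toNat 2 le_rfl p

theorem pv_repeat_eq_flatMap (row : List Char) (h : Int) :
    PySem.List.pyRepeat row h = (PySem.List.pyRange 0 h 1).flatMap (fun _ => row) := by
  have hlen : (PySem.List.pyRange 0 h 1).length = h.toNat := by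
    simp [PySem.List.length_pyRange_one]
  have hconst : ∀ (l : List Int), l.flatMap (fun _ => row) = (List.replicate l.length row).flatten := by
    intro l; induction l with
    | nil => simp
    | cons x t ih => simp [List.flatMap_cons, ih, List.replicate_succ]
  rw [hconst, hlen]
  simp [PySem.List.pyRepeat]

-- ===== VERDICT (by name: the statement is the Claim_ definition above) =====
theorem two_vertical_lines_spec : Claim_equal_two_vertical_lines := by
  intro width2 height2 char3 _
  unfold Spec_two_vertical_lines two_vertical_lines two_vertical_lines_alt
  by_cases hh : height2 ≤ 0
  · rw [if_pos hh, PySem.List.pyRange_one_eq_nil hh]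
    split <;> rfl
  · rw [if_neg hh]
    by_cases hw : width2 == 1
    · simp only [hw, if_true]
      rw [pv_repeat_eq_flatMap]
      rw [show (fun (pattern3 : List Char) (_ : Int) => pattern3 ++ char3.toList ++ ['\n'])
            = (fun (pattern3 : List Char) (_ : Int) => pattern3 ++ (char3.toList ++ ['\n'])) from
          funext fun p => funext fun _ => by simp]
      rw [PySem.List.foldl_append_eq_flatMap]
      simp
    · simp only [hw, if_false, Bool.false_eq_true]
      rw [pv_repeat_eq_flatMap]
      rw [show (fun (pattern3 : List Char) (_ : Int) =>
              let p1 := pattern3 ++ char3.toList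
              let p2 := (PySem.List.pyRange 0 width2 1).foldl
                (fun q d => if d > 1 then q ++ [' '] else q) p1
              p2 ++ char3.toList ++ ['\n'])
            = (fun (pattern3 : List Char) (_ : Int) =>
                pattern3 ++ (char3.toList ++ List.replicate (width2 - 2).toNat ' '
                  ++ char3.toList ++ ['\n'])) from
          funext fun p => funext fun _ => by
            simp only [pv_inner]; simp]
      rw [PySem.List.foldl_append_eq_flatMap]
      simp
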